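-- pv_equiv track=rewrite | github.com/dcschenc/myleetcode | 2638-number-of-subarrays-having-even-product/2638-number-of-subarrays-having-even-product.py | evenProduct
-- ===== SOURCE A (Python) =====
-- from typing import List
--
-- def evenProduct(nums: List[int]) -> int:
--     # https://leetcode.com/problems/number-of-subarrays-having-even-product/solutions/4351091/python-solution-one-pass-track-last-seen-even-index/
--     ans = 0
--     last_even = -1
--     for i, n in enumerate(nums):
--         if n % 2 == 0:
--             ans += (i + 1)
--             last_even = i
--         elif last_even != -1:
--             ans += (last_even + 1)
--
--     return ans
-- ===== SOURCE B (Python) =====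
-- from typing import List
--
-- def evenProduct(nums: List[int]) -> int:
--     # Complementary counting: all subarrays minus all-odd subarrays.
--     n = len(nums)
--     total = n * (n + 1) // 2
--     odd = 0
--     run = 0
--     for x in nums:
--         if x % 2 == 0:
--             odd += run * (run + 1) // 2
--             run = 0
--         else:
--             run += 1
--     odd += run * (run + 1) // 2
--     return total - odd
-- ===== Notes on version B (the rewrite author's own statement) =====
-- stated objective: alternative
-- what changed: B counts by complement: total subarrays n*(n+1)//2 minus the all-odd subarrays summed per run of consecutive odd numbers, instead of A's per-index accumulation tracking the last even index.
import Mathlib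
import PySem

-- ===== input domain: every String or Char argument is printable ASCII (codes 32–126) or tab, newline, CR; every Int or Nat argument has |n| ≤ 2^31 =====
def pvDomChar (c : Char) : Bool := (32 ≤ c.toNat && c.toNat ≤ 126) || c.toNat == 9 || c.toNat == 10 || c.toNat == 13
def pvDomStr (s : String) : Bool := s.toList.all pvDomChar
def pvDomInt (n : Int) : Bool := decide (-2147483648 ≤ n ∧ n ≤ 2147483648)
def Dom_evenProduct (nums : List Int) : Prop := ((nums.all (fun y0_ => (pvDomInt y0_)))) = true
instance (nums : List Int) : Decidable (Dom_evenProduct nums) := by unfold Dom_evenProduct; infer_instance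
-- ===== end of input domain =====

-- B counts by complement (total subarrays minus all-odd subarrays per odd run)
-- instead of A's per-index accumulation tracking the last even index; alternative decomposition, same O(n) cost.

-- ===== PORT A =====
def evenProduct (nums : List Int) : Int :=
  -- ans = 0; last_even = -1; for i, n in enumerate(nums): …
  let st := (PySem.List.enumerate nums).foldl
    (fun (st : Int × Int) (e : Int × Int) =>
      if PySem.Int.mod e.2 2 = 0 then (st.1 + (e.1 + 1), e.1)
      else if st.2 ≠ -1 then (st.1 + (st.2 + 1), st.2)
      else st)
    (0, -1)
  st.1

-- ===== PORT B =====
def evenProduct_alt (nums : List Int) : Int :=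
  let n : Int := nums.length
  let total := PySem.Int.floordiv (n * (n + 1)) 2
  let st := nums.foldl
    (fun (st : Int × Int) (x : Int) =>
      if PySem.Int.mod x 2 = 0 then (st.1 + PySem.Int.floordiv (st.2 * (st.2 + 1)) 2, 0)
      else (st.1, st.2 + 1))
    (0, 0)
  total - (st.1 + PySem.Int.floordiv (st.2 * (st.2 + 1)) 2)

-- ===== PRECONDITION & SPEC =====
def Spec_evenProduct (nums : List Int) (out : Int) : Prop := out = evenProduct_alt nums
instance (nums : List Int) (out : Int) : Decidable (Spec_evenProduct nums out) := by unfold Spec_evenProduct; infer_instance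

-- ===== CLAIM (what is proved, stated in full; the proofs are below) =====
def Claim_equal_evenProduct : Prop := ∀ (nums : List Int), Dom_evenProduct nums → Spec_evenProduct nums (evenProduct nums)

-- ===== LEMMAS AND PROOFS =====

/-- 2 * ((k*(k+1)) // 2) = k*(k+1): the product of consecutive integers is even. -/
theorem pv_two_fd (k : Int) : 2 * PySem.Int.floordiv (k * (k + 1)) 2 = k * (k + 1) := by
  rw [PySem.Int.floordiv_eq_ediv_of_pos (by norm_num)]
  exact Int.mul_ediv_cancel' (Int.even_mul_succ_self k).two_dvd

/-- Twice the number of subarrays of `l` seen as indexed from `s`: Σ 2*(s+j+1). -/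
def pvW : List Int → Int → Int
  | [], _ => 0
  | _ :: t, s => 2 * (s + 1) + pvW t (s + 1)

theorem pvW_eq (l : List Int) : ∀ s : Int, pvW l s = (l.length : Int) * (2 * s + l.length + 1) := by
  induction l with
  | nil => intro s; simp [pvW]
  | cons x t ih =>
    intro s
    simp only [pvW, ih, List.length_cons]
    push_cast
    ring

/-- Loop invariant tying A's (ans, last_even) fold to B's (odd, run) fold. -/
theorem pv_inv (l : List Int) : ∀ (s ans le odd run : Int), 0 ≤ s →
    ((run = s ∧ le = -1) ∨ (0 ≤ run ∧ run < s ∧ le = s - run - 1)) →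
    (2 * ((PySem.List.enumerate l s).foldl
        (fun (st : Int × Int) (e : Int × Int) =>
          if PySem.Int.mod e.2 2 = 0 then (st.1 + (e.1 + 1), e.1)
          else if st.2 ≠ -1 then (st.1 + (st.2 + 1), st.2)
          else st) (ans, le)).1
      + 2 * (l.foldl
        (fun (st : Int × Int) (x : Int) =>
          if PySem.Int.mod x 2 = 0 then (st.1 + PySem.Int.floordiv (st.2 * (st.2 + 1)) 2, 0)
          else (st.1, st.2 + 1)) (odd, run)).1
      + (l.foldl
        (fun (st : Int × Int) (x : Int) =>
          if PySem.Int.mod x 2 = 0 then (st.1 + PySem.Int.floordiv (st.2 * (st.2 + 1)) 2, 0)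
          else (st.1, st.2 + 1)) (odd, run)).2
        * ((l.foldl
        (fun (st : Int × Int) (x : Int) =>
          if PySem.Int.mod x 2 = 0 then (st.1 + PySem.Int.floordiv (st.2 * (st.2 + 1)) 2, 0)
          else (st.1, st.2 + 1)) (odd, run)).2 + 1))
    = 2 * ans + 2 * odd + run * (run + 1) + pvW l s := by
  induction l with
  | nil => intro s ans le odd run hs hinv; simp [pvW, PySem.List.enumerate_nil]
  | cons x t ih =>
    intro s ans le odd run hs hinv
    rw [PySem.List.enumerate_cons]
    by_cases hx : PySem.Int.mod x 2 = 0
    · simp only [List.foldl_cons, hx, if_true]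
      have h := ih (s + 1) (ans + (s + 1)) s (odd + PySem.Int.floordiv (run * (run + 1)) 2) 0
        (by omega) (Or.inr ⟨le_refl 0, by omega, by ring⟩)
      have hf := pv_two_fd run
      simp only [pvW]
      linear_combination h + hf
    · rcases hinv with ⟨hrun, hle⟩ | ⟨hr0, hrs, hle⟩
      · -- no even seen yet: last_even = -1, A adds nothing
        simp only [List.foldl_cons, hx, if_false, hle, ne_eq, not_true_eq_false]
        have h := ih (s + 1) ans (-1) odd (run + 1) (by omega) (Or.inl ⟨by omega, rfl⟩)
        simp only [pvW]
        subst hrun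
        linear_combination h
      · -- an even was seen: A adds last_even + 1 = s - run
        have hne : le ≠ -1 := by omega
        simp only [List.foldl_cons, hx, if_false, hne, ne_eq, not_false_eq_true, ite_true]
        have h := ih (s + 1) (ans + (le + 1)) le odd (run + 1) (by omega)
          (Or.inr ⟨by omega, by omega, by omega⟩)
        simp only [pvW]
        have : le = s - run - 1 := hle
        subst this
        linear_combination h
  
-- ===== VERDICT (by name: the statement is the Claim_ definition above) =====
theorem evenProduct_spec : Claim_equal_evenProduct := by
  intro nums _
  unfold Spec_evenProduct evenProduct evenProduct_alt
  have h := pv_inv nums 0 0 (-1) 0 0 (le_refl 0) (Or.inl ⟨rfl, rfl⟩)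
  rw [pvW_eq] at h
  have htot := pv_two_fd ((nums.length : Int))
  have hrun := pv_two_fd ((nums.foldl
        (fun (st : Int × Int) (x : Int) =>
          if PySem.Int.mod x 2 = 0 then (st.1 + PySem.Int.floordiv (st.2 * (st.2 + 1)) 2, 0)
          else (st.1, st.2 + 1)) (0, 0)).2)
  simp only []
  linarith [h, htot, hrun]
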